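-- pv_equiv track=rewrite | github.com/dhileepant/competitive-programming | Leetcode/Daily problems/2026/March2026/21.03.2026.py | reverseSubmatrix
-- ===== SOURCE A (Python) =====
-- def reverseSubmatrix(grid, x, y, k):
--     for j in range(y, y + k):
--         top = x
--         bottom = x + k - 1
--         while top < bottom:
--             grid[top][j], grid[bottom][j] = grid[bottom][j], grid[top][j]
--             top += 1
--             bottom -= 1
--     return grid
-- ===== SOURCE B (Python) =====
-- def reverseSubmatrix(grid, x, y, k):
--     rows = [grid[i][y:y + k] for i in range(x, x + k)]
--     rows.reverse()
--     for i in range(k):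
--         grid[x + i][y:y + k] = rows[i]
--     return grid
-- ===== Notes on version B (the rewrite author's own statement) =====
-- stated objective: alternative
-- what changed: Replaces A's per-column two-pointer element swaps with a gather-reverse-scatter over whole row segments: copy the k row slices, reverse the list, and write them back via slice assignment.
-- outside the precondition, e.g. on reverseSubmatrix([], 3, 0, 1): A returns [], B raises IndexError; on reverseSubmatrix([[1, 2], [3, 4]], 0, -2, 2): A returns [[3, 4], [1, 2]], B returns [[1, 2], [3, 4]]
import Mathlib
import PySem

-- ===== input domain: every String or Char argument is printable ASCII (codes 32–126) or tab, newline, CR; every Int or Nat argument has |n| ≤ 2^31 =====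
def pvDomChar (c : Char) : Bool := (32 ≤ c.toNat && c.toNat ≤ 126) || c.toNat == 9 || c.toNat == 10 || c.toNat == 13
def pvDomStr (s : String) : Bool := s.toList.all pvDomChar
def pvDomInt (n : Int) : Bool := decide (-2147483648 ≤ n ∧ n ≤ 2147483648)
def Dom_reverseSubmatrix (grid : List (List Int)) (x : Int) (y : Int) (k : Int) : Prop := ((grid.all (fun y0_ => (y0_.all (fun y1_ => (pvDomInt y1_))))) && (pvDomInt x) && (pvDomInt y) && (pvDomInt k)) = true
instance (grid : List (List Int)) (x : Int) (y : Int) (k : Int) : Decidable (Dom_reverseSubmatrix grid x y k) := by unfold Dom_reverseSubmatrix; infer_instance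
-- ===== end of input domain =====

-- B replaces A's per-column two-pointer element swaps by a gather-reverse-scatter over whole row
-- slices (objective: alternative decomposition, same cost). Both Pythons mutate `grid` in place
-- (the same row objects, element for element); the equivalence proved here is about the returned value.

-- ===== PORT A =====
-- grid[i]  (row read; exact for the in-range indices admitted by Pre_)
def pvRow (g : List (List Int)) (i : Int) : List Int := PySem.List.pyGetD g i []
-- grid[i][j]
def pvGet2 (g : List (List Int)) (i j : Int) : Int := PySem.List.pyGetD (pvRow g i) j 0
-- grid[i][j] = v
def pvSet2 (g : List (List Int)) (i j : Int) (v : Int) : List (List Int) :=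
  PySem.List.pySetD g i (PySem.List.pySetD (pvRow g i) j v)

-- the `while top < bottom` loop of A for one column j (both swap right-hand sides read the old grid)
def pvSwapLoop (g : List (List Int)) (j top bottom : Int) : List (List Int) :=
  if top < bottom then
    pvSwapLoop (pvSet2 (pvSet2 g top j (pvGet2 g bottom j)) bottom j (pvGet2 g top j))
      j (top + 1) (bottom - 1)
  else g
termination_by (bottom - top).toNat
decreasing_by omega

def reverseSubmatrix (grid : List (List Int)) (x : Int) (y : Int) (k : Int) : List (List Int) :=
  (PySem.List.pyRange y (y + k) 1).foldl (fun g j => pvSwapLoop g j x (x + k - 1)) grid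

-- ===== PORT B =====
-- row[a:b] = v, hand-ported: CPython slice assignment replaces the segment from the resolved
-- start index to max(start, stop) (exact for all int bounds; clampIdx is Python's index resolution)
def pvSetSlice (row : List Int) (a b : Int) (v : List Int) : List Int :=
  PySem.List.slice row none (some a) ++ v ++
    row.drop (max (PySem.List.clampIdx row.length a) (PySem.List.clampIdx row.length b))

def reverseSubmatrix_alt (grid : List (List Int)) (x : Int) (y : Int) (k : Int) : List (List Int) :=
  let rows := ((PySem.List.pyRange x (x + k) 1).map
    (fun i => PySem.List.slice (PySem.List.pyGetD grid i []) (some y) (some (y + k)))).reverse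
  (PySem.List.pyRange 0 k 1).foldl
    (fun g i => PySem.List.pySetD g (x + i)
      (pvSetSlice (PySem.List.pyGetD g (x + i) []) y (y + k) (PySem.List.pyGetD rows i []))) grid

-- ===== PRECONDITION & SPEC =====
-- Pre_ is the task's natural domain: k ≤ 1 (both loops do no swapping; for k = 1 the one row
-- B touches must exist and be non-negatively indexed) or a k×k block fully inside the grid.
-- It excludes out-of-range or negative x/y with k ≥ 2 (and out-of-range x with k = 1), on some
-- of which A still returns a value only through Python negative-index wraparound or an empty
-- `range` silently skipping the bounds check.
def Pre_reverseSubmatrix (grid : List (List Int)) (x : Int) (y : Int) (k : Int) : Prop :=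
  k ≤ 0 ∨ (k = 1 ∧ 0 ≤ x ∧ x < grid.length) ∨
  (0 ≤ x ∧ 0 ≤ y ∧ 0 ≤ k ∧ x + k ≤ grid.length ∧
    ∀ r ∈ PySem.List.slice grid (some x) (some (x + k)), y + k ≤ (r.length : Int))
instance (grid : List (List Int)) (x : Int) (y : Int) (k : Int) : Decidable (Pre_reverseSubmatrix grid x y k) := by unfold Pre_reverseSubmatrix; infer_instance
def pvWitness_reverseSubmatrix : List (List Int) × Int × Int × Int := ([[1, 2], [3, 4]], 0, 0, 2)

def Spec_reverseSubmatrix (grid : List (List Int)) (x : Int) (y : Int) (k : Int) (out : List (List Int)) : Prop := out = reverseSubmatrix_alt grid x y k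
instance (grid : List (List Int)) (x : Int) (y : Int) (k : Int) (out : List (List Int)) : Decidable (Spec_reverseSubmatrix grid x y k out) := by unfold Spec_reverseSubmatrix; infer_instance

-- ===== CLAIM (what is proved, stated in full; the proofs are below) =====
def Claim_equal_reverseSubmatrix : Prop := ∀ (grid : List (List Int)) (x : Int) (y : Int) (k : Int), Dom_reverseSubmatrix grid x y k → Pre_reverseSubmatrix grid x y k → Spec_reverseSubmatrix grid x y k (reverseSubmatrix grid x y k)

-- ===== LEMMAS AND PROOFS =====

-- rows xn..xn+kn-1 carry, on columns yn..yn+c-1, the values of their vertical mirror row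
def pvMix (r m : List Int) (yn c : Nat) : List Int :=
  r.take yn ++ (m.drop yn).take c ++ r.drop (yn + c)

-- A's intermediate state after c of the k columns are done
def pvPartial (grid : List (List Int)) (xn yn kn c : Nat) : List (List Int) :=
  (List.range grid.length).map (fun i =>
    if xn ≤ i ∧ i < xn + kn then
      pvMix (grid.getD i []) (grid.getD (xn + kn - 1 - (i - xn)) []) yn c
    else grid.getD i [])

-- B's intermediate state after c of the k rows are written back
def pvPartialB (grid : List (List Int)) (xn yn kn c : Nat) : List (List Int) :=
  (List.range grid.length).map (fun i =>
    if xn ≤ i ∧ i < xn + c then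
      pvMix (grid.getD i []) (grid.getD (xn + kn - 1 - (i - xn)) []) yn kn
    else grid.getD i [])

theorem pv_mix_zero (r m : List Int) (yn : Nat) : pvMix r m yn 0 = r := by simp [pvMix]

theorem pv_mix_length {r m : List Int} {yn c : Nat} (hr : yn + c ≤ r.length) (hm : yn + c ≤ m.length) :
    (pvMix r m yn c).length = r.length := by simp [pvMix]; omega

theorem pv_mix_getD {r m : List Int} {yn c : Nat} (hr : yn + c < r.length) (hm : yn + c ≤ m.length) :
    (pvMix r m yn c).getD (yn + c) 0 = r.getD (yn + c) 0 := by
  have h1 : (r.take yn).length = yn := by simp; omega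
  have h2 : ((m.drop yn).take c).length = c := by simp; omega
  simp [pvMix, List.getD_eq_getElem?_getD, List.getElem?_append, h1, h2, List.getElem?_drop]

theorem pv_mix_set {r m : List Int} {yn c : Nat} (hr : yn + c < r.length) (hm : yn + c < m.length) :
    (pvMix r m yn c).set (yn + c) (m.getD (yn + c) 0) = pvMix r m yn (c + 1) := by
  have h1 : (r.take yn).length = yn := by simp; omega
  have h2 : ((m.drop yn).take c).length = c := by simp; omega
  have hd : r.drop (yn + c) = r[yn + c] :: r.drop (yn + c + 1) := List.drop_eq_getElem_cons hr
  have ht : (m.drop yn).take (c+1) = (m.drop yn).take c ++ [m[yn + c]] := by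
    rw [List.take_add_one]
    simp [List.getElem?_drop, List.getElem?_eq_getElem hm]
  have hg : m.getD (yn + c) 0 = m[yn + c] := List.getD_eq_getElem m 0 hm
  have e0 : yn + c - yn - c = 0 := by omega
  simp only [pvMix, hg, ht, List.append_assoc]
  simp only [List.set_append, h1, h2]
  rw [if_neg (by omega), if_neg (by omega), e0, hd, List.set_cons_zero]
  simp
  omega

theorem pv_getD_set (g : List (List Int)) (a i : Nat) (v : List Int) :
    (g.set a v).getD i [] = if a = i ∧ a < g.length then v else g.getD i [] := by
  simp only [List.getD_eq_getElem?_getD, List.getElem?_set]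
  by_cases h1 : a = i
  · subst h1
    by_cases h2 : a < g.length
    · simp [h2]
    · rw [if_pos rfl, if_neg h2, if_neg (fun hh => h2 hh.2),
        List.getElem?_eq_none (le_of_not_gt h2)]
  · simp [h1]

theorem pv_mapRange_getD (f : Nat → List Int) (n i : Nat) (h : i < n) :
    ((List.range n).map f).getD i [] = f i := by
  simp [List.getD_eq_getElem?_getD, h]

theorem pv_mapRange_congr {n : Nat} {f g : Nat → List Int} (h : ∀ i < n, f i = g i) :
    (List.range n).map f = (List.range n).map g :=
  List.map_congr_left (fun a ha => h a (List.mem_range.mp ha))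

theorem pv_set_mapRange (f : Nat → List Int) (n a : Nat) (v : List Int) (_h : a < n) :
    ((List.range n).map f).set a v = (List.range n).map (fun i => if i = a then v else f i) := by
  apply List.ext_getElem
  · simp
  · intro i h1 h2
    simp only [List.getElem_set, List.getElem_map, List.getElem_range]
    by_cases hia : a = i
    · subst hia; simp
    · rw [if_neg hia, if_neg (fun h : i = a => hia h.symm)]

theorem pv_gridEta (g : List (List Int)) :
    (List.range g.length).map (fun i => g.getD i []) = g := by
  apply List.ext_getElem
  · simp
  · intro i h1 h2
    simp only [List.getElem_map, List.getElem_range]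
    exact List.getD_eq_getElem g [] h2

theorem pv_partial_zero (grid : List (List Int)) (xn yn kn : Nat) :
    pvPartial grid xn yn kn 0 = grid := by
  unfold pvPartial
  rw [pv_mapRange_congr (g := fun i => grid.getD i []) (fun i _ => by rw [pv_mix_zero, ite_self])]
  exact pv_gridEta grid

-- Nat-level readings of the A-side primitives
theorem pv_row_natCast (g : List (List Int)) (i : Nat) : pvRow g (i : Int) = g.getD i [] := by
  simp [pvRow]

theorem pv_get2_natCast (g : List (List Int)) (i j : Nat) :
    pvGet2 g (i : Int) (j : Int) = (g.getD i []).getD j 0 := by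
  simp [pvGet2, pv_row_natCast]

theorem pv_set2_natCast (g : List (List Int)) (i j : Nat) (v : Int) :
    pvSet2 g (i : Int) (j : Int) v = g.set i ((g.getD i []).set j v) := by
  simp [pvSet2, pv_row_natCast]

-- what one run of the `while top < bottom` loop does: it reverses column jn between rows tn..bn
theorem pv_swap_spec (N : Nat) : ∀ (g : List (List Int)) (jn tn bn : Nat),
    bn - tn = N → bn < g.length →
    (∀ i, tn ≤ i → i ≤ bn → jn < (g.getD i []).length) →
    pvSwapLoop g (jn : Int) (tn : Int) (bn : Int) =
      (List.range g.length).map (fun i =>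
        if tn ≤ i ∧ i ≤ bn then (g.getD i []).set jn ((g.getD (tn + bn - i) []).getD jn 0)
        else g.getD i []) := by
  induction N using Nat.strong_induction_on with
  | _ N IH =>
    intro g jn tn bn hN hb hj
    by_cases htb : tn < bn
    · rw [pvSwapLoop]
      rw [if_pos (by exact_mod_cast htb)]
      have ctop : ((tn:Int) + 1) = ((tn+1 : Nat) : Int) := by push_cast; ring
      have cbot : ((bn:Int) - 1) = ((bn-1 : Nat) : Int) := by
        push_cast [Nat.cast_sub (by omega : 1 ≤ bn)]; ring
      set A' : List Int := (g.getD tn []).set jn ((g.getD bn []).getD jn 0) with hA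
      set B' : List Int := (g.getD bn []).set jn ((g.getD tn []).getD jn 0) with hB
      have hg' : pvSet2 (pvSet2 g (tn:Int) (jn:Int) (pvGet2 g (bn:Int) (jn:Int))) (bn:Int) (jn:Int) (pvGet2 g (tn:Int) (jn:Int))
          = (g.set tn A').set bn B' := by
        rw [pv_get2_natCast, pv_get2_natCast, pv_set2_natCast]
        rw [pv_set2_natCast]
        congr 1
        rw [pv_getD_set]
        rw [if_neg (by intro h; omega)]
      rw [hg', ctop, cbot]
      have hlen' : ((g.set tn A').set bn B').length = g.length := by simp
      have hrows' : ∀ i : Nat, i ≠ tn → i ≠ bn →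
          ((g.set tn A').set bn B').getD i [] = g.getD i [] := by
        intro i h1 h2
        rw [pv_getD_set, if_neg (by intro h; exact h2 h.1.symm), pv_getD_set,
            if_neg (by intro h; exact h1 h.1.symm)]
      have hrowtn : ((g.set tn A').set bn B').getD tn [] = A' := by
        rw [pv_getD_set, if_neg (by intro h; omega), pv_getD_set, if_pos ⟨rfl, by omega⟩]
      have hrowbn : ((g.set tn A').set bn B').getD bn [] = B' := by
        rw [pv_getD_set, if_pos ⟨rfl, by simp; omega⟩]
      rw [IH (bn - 1 - (tn + 1)) (by omega) _ jn (tn+1) (bn-1) rfl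
          (by rw [hlen']; omega)
          (by intro i hi1 hi2
              rw [hrows' i (by omega) (by omega)]
              exact hj i (by omega) (by omega))]
      rw [hlen']
      apply pv_mapRange_congr
      intro i hilen
      by_cases hin : tn + 1 ≤ i ∧ i ≤ bn - 1
      · rw [if_pos hin, if_pos (by omega)]
        rw [hrows' i (by omega) (by omega), hrows' (tn + 1 + (bn - 1) - i) (by omega) (by omega)]
        have e : tn + 1 + (bn - 1) - i = tn + bn - i := by omega
        rw [e]
      · rw [if_neg hin]
        by_cases hitn : i = tn
        · rw [hitn, hrowtn, if_pos (by omega : tn ≤ tn ∧ tn ≤ bn)]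
          have e : tn + bn - tn = bn := by omega
          rw [e, hA]
        · by_cases hibn : i = bn
          · rw [hibn, hrowbn, if_pos (by omega : tn ≤ bn ∧ bn ≤ bn)]
            have e : tn + bn - bn = tn := by omega
            rw [e, hB]
          · rw [hrows' i hitn hibn, if_neg (by omega)]
    · rw [pvSwapLoop, if_neg (by exact_mod_cast htb)]
      by_cases heq : tn = bn
      · subst heq
        conv_lhs => rw [← pv_gridEta g]
        apply pv_mapRange_congr
        intro i hilen
        by_cases hin : tn ≤ i ∧ i ≤ tn
        · have e : i = tn := by omega
          rw [if_pos hin, e]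
          have hjl := hj tn le_rfl le_rfl
          have e2 : tn + tn - tn = tn := by omega
          rw [e2, List.getD_eq_getElem _ 0 hjl, List.set_getElem_self]
        · rw [if_neg hin]
      · conv_lhs => rw [← pv_gridEta g]
        apply pv_mapRange_congr
        intro i hilen
        rw [if_neg (by omega)]

theorem pv_partial_length (grid : List (List Int)) (xn yn kn c : Nat) :
    (pvPartial grid xn yn kn c).length = grid.length := by simp [pvPartial]

-- one outer iteration of A (column yn+c) advances pvPartial by one column
theorem pv_stepA (grid : List (List Int)) (xn yn kn c : Nat) (hc : c < kn)
    (hx : xn + kn ≤ grid.length)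
    (hy : ∀ i, xn ≤ i → i < xn + kn → yn + kn ≤ (grid.getD i []).length) :
    pvSwapLoop (pvPartial grid xn yn kn c) ((yn:Int) + (c:Int)) (xn:Int) ((xn:Int) + (kn:Int) - 1)
      = pvPartial grid xn yn kn (c + 1) := by
  have hrowlen : ∀ i, xn ≤ i → i < xn + kn →
      (pvPartial grid xn yn kn c).getD i []
        = pvMix (grid.getD i []) (grid.getD (xn + kn - 1 - (i - xn)) []) yn c := by
    intro i h1 h2
    unfold pvPartial
    rw [pv_mapRange_getD _ _ _ (by omega), if_pos ⟨h1, h2⟩]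
  have hmirror_mem : ∀ i, xn ≤ i → i < xn + kn →
      xn ≤ xn + kn - 1 - (i - xn) ∧ xn + kn - 1 - (i - xn) < xn + kn := by
    intro i h1 h2; omega
  have hlenmix : ∀ i, xn ≤ i → i < xn + kn →
      ((pvPartial grid xn yn kn c).getD i []).length = (grid.getD i []).length := by
    intro i h1 h2
    rw [hrowlen i h1 h2]
    exact pv_mix_length (by have := hy i h1 h2; omega)
      (by have := hy _ (hmirror_mem i h1 h2).1 (hmirror_mem i h1 h2).2; omega)
  have cj : ((yn:Int) + (c:Int)) = ((yn + c : Nat) : Int) := by push_cast; ring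
  have cb : ((xn:Int) + (kn:Int) - 1) = ((xn + kn - 1 : Nat) : Int) := by
    push_cast [Nat.cast_sub (by omega : 1 ≤ xn + kn)]; ring
  rw [cj, cb]
  rw [pv_swap_spec ((xn + kn - 1) - xn) _ (yn + c) xn (xn + kn - 1) rfl
      (by rw [pv_partial_length]; omega)
      (by intro i h1 h2
          rw [hlenmix i h1 (by omega)]
          have := hy i h1 (by omega); omega)]
  rw [pv_partial_length]
  conv_rhs => unfold pvPartial
  apply pv_mapRange_congr
  intro i hilen
  by_cases hin : xn ≤ i ∧ i < xn + kn
  · rw [if_pos (by omega : xn ≤ i ∧ i ≤ xn + kn - 1), if_pos hin]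
    have hmm : xn + (xn + kn - 1) - i = xn + kn - 1 - (i - xn) := by omega
    rw [hmm]
    have hmmin := hmirror_mem i hin.1 hin.2
    rw [hrowlen i hin.1 hin.2, hrowlen _ hmmin.1 hmmin.2]
    have hmmback : xn + kn - 1 - (xn + kn - 1 - (i - xn) - xn) = i := by omega
    rw [hmmback]
    have h1 := hy i hin.1 hin.2
    have h2 := hy _ hmmin.1 hmmin.2
    rw [pv_mix_getD (by omega) (by omega)]
    rw [pv_mix_set (by omega) (by omega)]
  · rw [if_neg (by omega), if_neg hin]
    unfold pvPartial
    rw [pv_mapRange_getD _ _ _ hilen, if_neg hin]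

theorem mainA (grid : List (List Int)) (xn yn kn : Nat)
    (hx : xn + kn ≤ grid.length)
    (hy : ∀ i, xn ≤ i → i < xn + kn → yn + kn ≤ (grid.getD i []).length) :
    reverseSubmatrix grid (xn : Int) (yn : Int) (kn : Int) = pvPartial grid xn yn kn kn := by
  unfold reverseSubmatrix
  rw [PySem.List.pyRange_one]
  have e1 : (((yn:Int) + (kn:Int)) - (yn:Int)).toNat = kn := by omega
  rw [e1, List.foldl_map]
  have key : ∀ c, c ≤ kn →
      List.foldl (fun g (t : Nat) => pvSwapLoop g ((yn:Int) + (t:Int)) (xn:Int) ((xn:Int) + (kn:Int) - 1))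
        grid (List.range c) = pvPartial grid xn yn kn c := by
    intro c
    induction c with
    | zero => intro _; simp [pv_partial_zero]
    | succ c ih =>
      intro hc
      rw [List.range_succ, List.foldl_append, ih (by omega)]
      simp only [List.foldl_cons, List.foldl_nil]
      exact pv_stepA grid xn yn kn c (by omega) hx hy
  exact key kn le_rfl

theorem pv_partialB_getD (grid : List (List Int)) (xn yn kn c i : Nat) (h : i < grid.length) :
    (pvPartialB grid xn yn kn c).getD i []
      = if xn ≤ i ∧ i < xn + c then
          pvMix (grid.getD i []) (grid.getD (xn + kn - 1 - (i - xn)) []) yn kn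
        else grid.getD i [] := by
  unfold pvPartialB
  rw [pv_mapRange_getD _ _ _ h]

theorem pv_revMapRange_getD (f : Nat → List Int) (n c : Nat) (_h : c < n) :
    ((List.range n).map f).reverse.getD c [] = f (n - 1 - c) := by
  rw [List.getD_eq_getElem?_getD, List.getElem?_reverse (by simp; omega)]
  have e : ((List.range n).map f).length - 1 - c = n - 1 - c := by simp
  rw [e, List.getElem?_map, List.getElem?_range (by omega : n - 1 - c < n)]
  simp

-- writing a slice of a list back onto itself changes nothing (any int bounds)
theorem pv_setslice_self (xs : List Int) (a b : Int) :
    pvSetSlice xs a b (PySem.List.slice xs (some a) (some b)) = xs := by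
  unfold pvSetSlice
  simp only [PySem.List.slice]
  set ca := PySem.List.clampIdx xs.length a with hca
  set cb := PySem.List.clampIdx xs.length b with hcb
  have hcan : ca ≤ xs.length := PySem.List.clampIdx_le _ _
  have hcbn : cb ≤ xs.length := PySem.List.clampIdx_le _ _
  simp only [Nat.sub_zero, List.drop_zero]
  rcases le_or_gt ca cb with hle | hgt
  · have hmax : max ca cb = cb := by omega
    have h2 : (xs.drop ca).take (cb - ca) ++ xs.drop cb = xs.drop ca := by
      have : xs.drop cb = (xs.drop ca).drop (cb - ca) := by
        rw [List.drop_drop]; congr 1; omega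
      rw [this, List.take_append_drop]
    rw [hmax, List.append_assoc, h2]
    exact List.take_append_drop ca xs
  · have hmax : max ca cb = ca := by omega
    have h0 : cb - ca = 0 := by omega
    rw [hmax, h0]
    simp only [List.take_zero, List.append_nil]
    exact List.take_append_drop ca xs

-- pvSetSlice at the natural-number bounds yn, yn+kn admitted by the main branch of Pre_
theorem pv_setslice_natCast (r v : List Int) (yn kn : Nat) (h : yn + kn ≤ r.length) :
    pvSetSlice r (yn : Int) ((yn : Int) + (kn : Int)) v
      = r.take yn ++ v ++ r.drop (yn + kn) := by
  unfold pvSetSlice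
  have cy : ((yn : Int) + (kn : Int)) = ((yn + kn : Nat) : Int) := by push_cast; ring
  rw [cy, PySem.List.slice_to_natCast, PySem.List.clampIdx_natCast, PySem.List.clampIdx_natCast]
  congr 2
  omega

theorem mainB (grid : List (List Int)) (xn yn kn : Nat)
    (hx : xn + kn ≤ grid.length)
    (hy : ∀ i, xn ≤ i → i < xn + kn → yn + kn ≤ (grid.getD i []).length) :
    reverseSubmatrix_alt grid (xn : Int) (yn : Int) (kn : Int) = pvPartial grid xn yn kn kn := by
  unfold reverseSubmatrix_alt
  -- the gathered (and reversed) row slices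
  have hrows : ((PySem.List.pyRange (xn:Int) ((xn:Int) + (kn:Int)) 1).map
      (fun i => PySem.List.slice (PySem.List.pyGetD grid i []) (some (yn:Int)) (some ((yn:Int) + (kn:Int))))).reverse
      = ((List.range kn).map (fun t => ((grid.getD (xn + t) []).drop yn).take kn)).reverse := by
    rw [PySem.List.pyRange_one]
    have e1 : (((xn:Int) + (kn:Int)) - (xn:Int)).toNat = kn := by omega
    rw [e1, List.map_map]
    congr 1
    apply List.map_congr_left
    intro t ht
    simp only [Function.comp_apply]
    have c1 : ((xn:Int) + (t:Int)) = ((xn + t : Nat) : Int) := by push_cast; ring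
    rw [c1, PySem.List.pyGetD_natCast, PySem.List.slice_natCast_add]
  rw [hrows]
  rw [PySem.List.pyRange_one]
  have e2 : (((kn:Int)) - 0).toNat = kn := by omega
  simp only [Int.sub_zero] at *
  rw [e2, List.foldl_map]
  have key : ∀ c, c ≤ kn →
      List.foldl (fun g (t : Nat) => PySem.List.pySetD g ((xn:Int) + ((0:Int) + (t:Int)))
          (pvSetSlice (PySem.List.pyGetD g ((xn:Int) + ((0:Int) + (t:Int))) []) (yn:Int) ((yn:Int) + (kn:Int))
            (PySem.List.pyGetD ((List.range kn).map (fun t => ((grid.getD (xn + t) []).drop yn).take kn)).reverse ((0:Int) + (t:Int)) [])))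
        grid (List.range c) = pvPartialB grid xn yn kn c := by
    intro c
    induction c with
    | zero =>
      intro _
      have hz : pvPartialB grid xn yn kn 0 = grid := by
        unfold pvPartialB
        rw [pv_mapRange_congr (g := fun i => grid.getD i []) (fun i _ => by rw [if_neg (by omega)]),
          pv_gridEta]
      rw [hz]
      rfl
    | succ c ih =>
      intro hc
      rw [List.range_succ, List.foldl_append, ih (by omega)]
      simp only [List.foldl_cons, List.foldl_nil]
      have c0 : ((0:Int) + (c:Int)) = (c:Int) := by ring
      have c1 : ((xn:Int) + (c:Int)) = ((xn + c : Nat) : Int) := by push_cast; ring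
      rw [c0, c1, PySem.List.pyGetD_natCast, PySem.List.pyGetD_natCast, PySem.List.pySetD_natCast]
      -- the row being written was not touched yet
      have hcur : (pvPartialB grid xn yn kn c).getD (xn + c) [] = grid.getD (xn + c) [] := by
        rw [pv_partialB_getD _ _ _ _ _ _ (by omega), if_neg (by omega)]
      rw [hcur]
      -- rows[c] is the slice of the mirror row
      have hrc : ((List.range kn).map (fun t => ((grid.getD (xn + t) []).drop yn).take kn)).reverse.getD c []
          = ((grid.getD (xn + (kn - 1 - c)) []).drop yn).take kn := by
        rw [pv_revMapRange_getD _ _ _ (by omega)]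
      rw [hrc]
      -- the written row is exactly pvMix of the row and its mirror
      have hset : pvSetSlice (grid.getD (xn + c) []) (yn:Int) ((yn:Int) + (kn:Int))
          (((grid.getD (xn + (kn - 1 - c)) []).drop yn).take kn)
          = pvMix (grid.getD (xn + c) []) (grid.getD (xn + (kn - 1 - c)) []) yn kn := by
        rw [pv_setslice_natCast _ _ _ _ (hy (xn + c) (by omega) (by omega))]
        rfl
      rw [hset]
      -- and setting it advances pvPartialB by one row
      unfold pvPartialB
      rw [pv_set_mapRange _ _ _ _ (by omega)]
      apply pv_mapRange_congr
      intro i hilen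
      by_cases hie : i = xn + c
      · rw [if_pos hie, hie, if_pos (by omega)]
        have e : xn + kn - 1 - (xn + c - xn) = xn + (kn - 1 - c) := by omega
        rw [e]
      · rw [if_neg hie]
        by_cases hin : xn ≤ i ∧ i < xn + c
        · rw [if_pos hin, if_pos (by omega)]
        · rw [if_neg hin, if_neg (by omega)]
  have fin : pvPartialB grid xn yn kn kn = pvPartial grid xn yn kn kn := rfl
  rw [key kn le_rfl, fin]

theorem pv_mem_slice (grid : List (List Int)) (xn kn i : Nat)
    (h1 : xn ≤ i) (h2 : i < xn + kn) (h3 : xn + kn ≤ grid.length) :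
    grid.getD i [] ∈ PySem.List.slice grid (some (xn:Int)) (some ((xn:Int) + (kn:Int))) := by
  have c1 : ((xn:Int) + (kn:Int)) = ((xn + kn : Nat) : Int) := by push_cast; ring
  rw [c1, PySem.List.slice_natCast]
  have e : xn + kn - xn = kn := by omega
  rw [e]
  have hlen : ((grid.drop xn).take kn).length = kn := by simp; omega
  have hi : i - xn < ((grid.drop xn).take kn).length := by omega
  have : ((grid.drop xn).take kn)[i - xn] = grid.getD i [] := by
    rw [List.getElem_take, List.getElem_drop]
    rw [← List.getD_eq_getElem grid ([] : List Int) (show xn + (i - xn) < grid.length by omega)]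
    congr 1
    omega
  rw [← this]
  exact List.getElem_mem hi

-- with k ≤ 1 neither loop of A swaps anything: A returns the grid unchanged
theorem pv_A_trivial (grid : List (List Int)) (x y k : Int) (hk : k ≤ 1) :
    reverseSubmatrix grid x y k = grid := by
  unfold reverseSubmatrix
  rcases lt_or_ge k 1 with h | h
  · have : PySem.List.pyRange y (y + k) 1 = [] := by
      rw [PySem.List.pyRange_one]
      have : ((y + k) - y).toNat = 0 := by omega
      rw [this]; rfl
    rw [this]; rfl
  · have hk1 : k = 1 := by omega
    subst hk1
    have : PySem.List.pyRange y (y + 1) 1 = [y] := by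
      rw [PySem.List.pyRange_one]
      have : ((y + 1) - y).toNat = 1 := by omega
      rw [this]; simp
    rw [this]
    simp only [List.foldl_cons, List.foldl_nil]
    rw [pvSwapLoop, if_neg (by omega)]

-- with k ≤ 0 B's comprehension and loop are both empty
theorem pv_B_trivial_le (grid : List (List Int)) (x y k : Int) (hk : k ≤ 0) :
    reverseSubmatrix_alt grid x y k = grid := by
  unfold reverseSubmatrix_alt
  have : PySem.List.pyRange 0 k 1 = [] := by
    rw [PySem.List.pyRange_one]
    have : (k - 0).toNat = 0 := by omega
    rw [this]; rfl
  rw [this]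
  rfl

-- with k = 1 B re-writes the single gathered slice back where it came from
theorem pv_B_trivial_one (grid : List (List Int)) (x y : Int) (xn : Nat)
    (hx : x = (xn : Int)) (hxl : xn < grid.length) :
    reverseSubmatrix_alt grid x y 1 = grid := by
  subst hx
  unfold reverseSubmatrix_alt
  have h1 : PySem.List.pyRange (xn : Int) ((xn : Int) + 1) 1 = [(xn : Int)] := by
    rw [PySem.List.pyRange_one]
    have : (((xn : Int) + 1) - (xn : Int)).toNat = 1 := by omega
    rw [this]; simp
  have h0 : PySem.List.pyRange 0 1 1 = [(0 : Int)] := by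
    rw [PySem.List.pyRange_one]; rfl
  rw [h1, h0]
  simp only [List.map_cons, List.map_nil, List.reverse_cons, List.reverse_nil,
    List.nil_append, List.foldl_cons, List.foldl_nil, Int.add_zero,
    PySem.List.pyGetD_zero_cons, PySem.List.pyGetD_natCast, PySem.List.pySetD_natCast]
  rw [pv_setslice_self _ y (y + 1)]
  rw [List.getD_eq_getElem grid ([] : List Int) hxl]
  exact List.set_getElem_self hxl

-- ===== VERDICT (by name: the statement is the Claim_ definition above) =====
theorem reverseSubmatrix_spec : Claim_equal_reverseSubmatrix := by
  intro grid x y k _hdom hpre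
  unfold Spec_reverseSubmatrix
  rcases hpre with hk | ⟨hk1, hx0, hxl⟩ | ⟨hx0, hy0, hk0, hxk, hrow⟩
  · rw [pv_A_trivial grid x y k (by omega), pv_B_trivial_le grid x y k hk]
  · obtain ⟨xn, rfl⟩ := Int.eq_ofNat_of_zero_le hx0
    subst hk1
    rw [pv_A_trivial grid _ y 1 le_rfl,
      pv_B_trivial_one grid _ y xn rfl (by exact_mod_cast hxl)]
  · obtain ⟨xn, rfl⟩ := Int.eq_ofNat_of_zero_le hx0
    obtain ⟨yn, rfl⟩ := Int.eq_ofNat_of_zero_le hy0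
    obtain ⟨kn, rfl⟩ := Int.eq_ofNat_of_zero_le hk0
    have hx : xn + kn ≤ grid.length := by exact_mod_cast hxk
    have hy : ∀ i, xn ≤ i → i < xn + kn → yn + kn ≤ (grid.getD i []).length := by
      intro i h1 h2
      have := hrow _ (pv_mem_slice grid xn kn i h1 h2 hx)
      exact_mod_cast this
    rw [mainA grid xn yn kn hx hy, mainB grid xn yn kn hx hy]
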